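-- pv_equiv track=rewrite | github.com/telepathylabsai/OpenDF | opendf/graph/constr_graph.py | string_is_number
-- ===== SOURCE A (Python) =====
-- def string_is_number(s):
--     for i, c in enumerate(s):
--         if c == '-' and i != 0:
--             return False
--         if c not in '1234567890.':
--             return False
--     if s.count('.') > 1:
--         return False
--     return True
-- ===== SOURCE B (Python) =====
-- import re
--
-- _NUM = re.compile(r'[0-9]*\.?[0-9]*')
--
-- def string_is_number(s):
--     return _NUM.fullmatch(s) is not None
-- ===== Notes on version B (the rewrite author's own statement) =====
-- stated objective: idiomatic
-- what changed: Replaces the manual indexed character scan plus a separate dot-count pass with a single regular-expression fullmatch of the pattern [0-9]*\.?[0-9]*.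
import Mathlib
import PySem

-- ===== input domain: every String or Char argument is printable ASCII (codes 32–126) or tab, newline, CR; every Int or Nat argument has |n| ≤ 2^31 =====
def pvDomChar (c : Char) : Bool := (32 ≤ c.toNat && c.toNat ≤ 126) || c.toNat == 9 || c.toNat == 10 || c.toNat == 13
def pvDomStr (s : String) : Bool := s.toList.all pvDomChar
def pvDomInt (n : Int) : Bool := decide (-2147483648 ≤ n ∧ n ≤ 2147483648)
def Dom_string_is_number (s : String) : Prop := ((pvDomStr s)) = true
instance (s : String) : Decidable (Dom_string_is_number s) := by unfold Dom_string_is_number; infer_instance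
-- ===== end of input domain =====

-- B replaces A's indexed character scan + separate dot-count pass with a single
-- regex fullmatch of [0-9]*\.?[0-9]*, ported here as the structural matcher of that pattern.

-- ===== PORT A =====
-- the enumerate loop with its two early returns, then the s.count('.') check
def sinLoopA : List Char → Nat → Bool
  | [], _ => true
  | c :: rest, i =>
    if c == '-' && decide (i ≠ 0) then false
    else if !("1234567890.".toList.contains c) then false
    else sinLoopA rest (i + 1)

def string_is_number (s : String) : Bool :=
  if !(sinLoopA s.toList 0) then false
  else if 1 < PySem.Str.count s "." then false
  else true

-- ===== PORT B =====
-- [0-9] character class of the regex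
def sinDigit (c : Char) : Bool := '0' ≤ c && c ≤ '9'

-- fullmatch of [0-9]*\.?[0-9]*: eat leading digits, optionally one '.', then only digits
def string_is_number_alt (s : String) : Bool :=
  match s.toList.dropWhile sinDigit with
  | [] => true
  | '.' :: rest => rest.all sinDigit
  | _ => false

-- ===== PRECONDITION & SPEC =====
def Spec_string_is_number (s : String) (out : Bool) : Prop := out = string_is_number_alt s
instance (s : String) (out : Bool) : Decidable (Spec_string_is_number s out) := by unfold Spec_string_is_number; infer_instance

-- ===== CLAIM (what is proved, stated in full; the proofs are below) =====
def Claim_equal_string_is_number : Prop := ∀ (s : String), Dom_string_is_number s → Spec_string_is_number s (string_is_number s)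

-- ===== LEMMAS AND PROOFS =====

-- proof-side name for A's character class (kept opaque to simp)
def sinClass (c : Char) : Bool := "1234567890.".toList.contains c

theorem char_beq_eq_toNat (c d : Char) : (c == d) = (c.toNat == d.toNat) := by
  rw [Bool.eq_iff_iff, beq_iff_eq, beq_iff_eq]
  exact ⟨fun h => by rw [h], fun h => Char.ext (UInt32.toNat_inj.mp h)⟩

theorem sin_contains_eq (c : Char) : sinClass c = (sinDigit c || c == '.') := by
  have h : "1234567890.".toList = ['1','2','3','4','5','6','7','8','9','0','.'] := by decide
  have v : ∀ d : Char, d.val.toNat = d.toNat := fun _ => rfl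
  rw [sinClass, h, Bool.eq_iff_iff]
  simp only [List.contains_cons, List.contains_nil, Bool.or_false, sinDigit, char_beq_eq_toNat,
    Bool.or_eq_true, Bool.and_eq_true, beq_iff_eq, decide_eq_true_eq,
    Char.le_def, UInt32.le_iff_toNat_le, v,
    show ('1' : Char).toNat = 49 from rfl, show ('2' : Char).toNat = 50 from rfl,
    show ('3' : Char).toNat = 51 from rfl, show ('4' : Char).toNat = 52 from rfl,
    show ('5' : Char).toNat = 53 from rfl, show ('6' : Char).toNat = 54 from rfl,
    show ('7' : Char).toNat = 55 from rfl, show ('8' : Char).toNat = 56 from rfl,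
    show ('9' : Char).toNat = 57 from rfl, show ('0' : Char).toNat = 48 from rfl,
    show ('.' : Char).toNat = 46 from rfl]
  omega

-- A's loop returns True iff every character is in the class (the '-' branch is redundant)
theorem sinLoopA_eq_all (cs : List Char) (i : Nat) : sinLoopA cs i = cs.all sinClass := by
  induction cs generalizing i with
  | nil => rfl
  | cons c t ih =>
    rw [show sinLoopA (c :: t) i
        = (if (c == '-' && decide (i ≠ 0)) = true then false
           else if (!(sinClass c)) = true then false else sinLoopA t (i + 1)) from rfl]
    by_cases hm : (c == '-' && decide (i ≠ 0)) = true
    · have hc : c = '-' := beq_iff_eq.mp (Bool.and_eq_true_iff.mp hm).1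
      subst hc
      rw [if_pos hm, List.all_cons, show sinClass '-' = false by decide, Bool.false_and]
    · rw [if_neg hm, List.all_cons]
      cases hsc : sinClass c
      · simp
      · simp [ih]

-- PySem.Chars.count.go with the one-character needle ['.'] is List.count
theorem count_go_dot (fuel : Nat) (l : List Char) (acc : Nat) (h : l.length ≤ fuel) :
    PySem.Chars.count.go ['.'] fuel l acc = acc + l.count '.' := by
  induction fuel generalizing l acc with
  | zero =>
    have : l = [] := List.eq_nil_of_length_eq_zero (Nat.le_zero.mp h)
    subst this; simp [PySem.Chars.count.go]
  | succ n ih =>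
    cases l with
    | nil => simp [PySem.Chars.count.go]
    | cons c t =>
      have ht : t.length ≤ n := by simpa using h
      by_cases hc : c = '.'
      · subst hc
        simp [PySem.Chars.count.go, List.isPrefixOf, ih _ _ ht]
        omega
      · have h1 : ('.' == c) = false := by simp [Ne.symm hc]
        have h2 : (c == '.') = false := by simp [hc]
        simp [PySem.Chars.count.go, List.isPrefixOf, h1, h2, ih _ _ ht, List.count_cons]

theorem str_count_dot (s : String) : PySem.Str.count s "." = s.toList.count '.' := by
  rw [PySem.Str.count_eq]
  show PySem.Chars.count s.toList ['.'] = _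
  rw [PySem.Chars.count]
  simp only [List.isEmpty_cons, if_false, Bool.false_eq_true]
  exact by simpa using count_go_dot s.toList.length s.toList 0 (Nat.le_refl _)

-- all digits = all in class and no dot
theorem all_digit_eq (t : List Char) :
    t.all sinDigit = (t.all sinClass && decide (t.count '.' = 0)) := by
  induction t with
  | nil => rfl
  | cons c t ih =>
    rw [List.all_cons, List.all_cons, List.count_cons]
    by_cases hc : c = '.'
    · subst hc
      simp [show sinDigit '.' = false by decide]
    · have h1 : sinClass c = sinDigit c := by
        rw [sin_contains_eq, show (c == '.') = false by simp [hc], Bool.or_false]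
      rw [h1, ih, if_neg (by simp [hc]), Nat.add_zero]
      cases sinDigit c <;> simp

-- B's matcher = "all chars in class and at most one dot"
theorem alt_core (cs : List Char) :
    (match cs.dropWhile sinDigit with
      | [] => true
      | '.' :: rest => rest.all sinDigit
      | _ => false)
      = (cs.all sinClass && decide (cs.count '.' ≤ 1)) := by
  induction cs with
  | nil => rfl
  | cons c t ih =>
    by_cases hd : sinDigit c = true
    · have hcne : (c == '.') = false := by
        simp only [beq_eq_false_iff_ne, ne_eq]
        rintro rfl; exact absurd hd (by decide)
      have h1 : sinClass c = true := by rw [sin_contains_eq, hd, Bool.true_or]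
      rw [List.dropWhile_cons, if_pos hd, List.all_cons, h1, Bool.true_and,
        List.count_cons, if_neg (by simp [hcne]), Nat.add_zero, ih]
    · rw [List.dropWhile_cons, if_neg hd]
      by_cases hc : c = '.'
      · subst hc
        rw [show (match ('.' :: t : List Char) with
              | [] => true
              | '.' :: rest => rest.all sinDigit
              | _ => false) = t.all sinDigit from rfl,
          List.all_cons, show sinClass '.' = true by decide, Bool.true_and,
          List.count_cons, if_pos (show ('.' == '.') = true by decide), all_digit_eq]
        cases t.all sinClass
        · simp
        · simp only [Bool.true_and]
          rw [decide_eq_decide]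
          omega
      · have h1 : sinClass c = false := by
          rw [sin_contains_eq, Bool.eq_false_iff.mpr hd,
            show (c == '.') = false by simp [hc]]; rfl
        rw [List.all_cons, h1, Bool.false_and, Bool.false_and]
        split <;> simp_all

-- ===== VERDICT (by name: the statement is the Claim_ definition above) =====
theorem string_is_number_spec : Claim_equal_string_is_number := by
  intro s _
  unfold Spec_string_is_number string_is_number string_is_number_alt
  have hl : sinLoopA s.toList 0 = s.toList.all sinClass := sinLoopA_eq_all _ _
  rw [hl, str_count_dot, alt_core]
  cases h : s.toList.all sinClass
  · simp
  · simp only [Bool.not_true, Bool.false_eq_true, if_false, Bool.true_and]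
    by_cases hc : 1 < s.toList.count '.'
    · rw [if_pos hc, eq_comm, decide_eq_false_iff_not]; omega
    · rw [if_neg hc, eq_comm, decide_eq_true_eq]; omega
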